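-- pv_equiv track=rewrite | github.com/eungi-aiza/BasicAlgorithm | donghwa/qual/2203/01_palindrome_gwangeun.py | max_palindromes
-- ===== SOURCE A (Python) =====
-- def palindrome(s):
--     return s == s[-1::-1] # 뒤집기 = s[::-1]
--
-- def substring(s, t):
--     return t in s
--
-- def max_palindromes(s):
--     ret = []
--     sidx = 0
--     for sidx in range(len(s)):
--         pd = s[sidx]
--         for eidx in range(sidx + 1, len(s) + 1):
--             if palindrome(s[sidx:eidx]):
--                 pd = s[sidx:eidx]
--         for prev in ret:
--             if substring(prev, pd):
--                 pd = None
--                 break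
--         if pd:
--             ret.append(pd)
--     return ret
-- ===== SOURCE B (Python) =====
-- def max_palindromes(s):
--     n = len(s)
--     # best[i] = length of the longest palindromic substring starting at i,
--     # computed by expanding around every center (odd and even) and recording
--     # each palindrome found at its start index.
--     best = [1] * n
--     for c in range(n):
--         r = 0
--         while r <= c and c + r < n and s[c - r] == s[c + r]:
--             l = c - r
--             if 2 * r + 1 > best[l]:
--                 best[l] = 2 * r + 1
--             r += 1
--         r = 0
--         while r <= c and c + 1 + r < n and s[c - r] == s[c + 1 + r]:
--             l = c - r
--             if 2 * r + 2 > best[l]: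
--                 best[l] = 2 * r + 2
--             r += 1
--     ret = []
--     for i in range(n):
--         pd = s[i:i + best[i]]
--         if not any(pd in prev for prev in ret):
--             ret.append(pd)
--     return ret
-- ===== Notes on version B (the rewrite author's own statement) =====
-- stated objective: faster
-- what changed: B replaces A's per-start cubic scan (for every start, try every end, slice-reverse-compare) by the expand-around-center algorithm: one pass over all odd/even centers fills a best-length-per-start array in O(n^2), then a single staged pass slices s[i:i+best[i]] and dedups by containment.
import Mathlib
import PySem

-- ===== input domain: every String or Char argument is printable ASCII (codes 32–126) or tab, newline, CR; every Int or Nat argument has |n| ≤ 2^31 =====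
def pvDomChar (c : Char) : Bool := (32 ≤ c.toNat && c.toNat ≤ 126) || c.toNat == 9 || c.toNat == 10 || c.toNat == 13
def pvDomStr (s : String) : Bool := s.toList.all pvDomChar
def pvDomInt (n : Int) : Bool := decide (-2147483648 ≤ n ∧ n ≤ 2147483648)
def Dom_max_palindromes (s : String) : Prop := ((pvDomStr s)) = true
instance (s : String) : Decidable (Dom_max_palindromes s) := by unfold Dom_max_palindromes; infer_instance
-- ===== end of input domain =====

-- B computes the longest palindrome per start index with the expand-around-center
-- algorithm (a best-length array filled over all odd/even centers) instead of A's
-- per-start scan over all ends with slice-reverse checks; measured asymptotically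
-- faster on the timing inputs.


-- ===== PORT A =====
-- palindrome(s): s == s[-1::-1]  (step -1 is never 0, so slice? is never none)
def pvPalindromeA (t : String) : Bool :=
  t == (PySem.Str.slice? t (some (-1)) none (-1)).getD ""

-- substring(s, t): t in s
def pvSubstringA (s t : String) : Bool := PySem.Str.isIn t s

-- the 'for prev in ret: … break' loop of A (break = stop the recursion)
def pvDedupA : List String → String → Option String
  | [], pd => some pd
  | prev :: rest, pd => if pvSubstringA prev pd then none else pvDedupA rest pd

def max_palindromes (s : String) : List String :=
  (PySem.List.pyRange 0 (PySem.Str.len s) 1).foldl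
    (fun ret sidx =>
      -- pd = s[sidx]  (sidx ∈ range(len(s)) is always in range, so pyGet? is some)
      let pd0 := ((PySem.Str.pyGet? s sidx).map (fun c => String.ofList [c])).getD ""
      let pd := (PySem.List.pyRange (sidx + 1) (PySem.Str.len s + 1) 1).foldl
        (fun pd eidx =>
          if pvPalindromeA (PySem.Str.slice s (some sidx) (some eidx)) then
            PySem.Str.slice s (some sidx) (some eidx)
          else pd) pd0
      match pvDedupA ret pd with
      | none => ret
      | some p => if p == "" then ret else ret ++ [p])
    []

-- ===== PORT B =====
-- the odd-center while loop of Source B: expand around center c, recording 2r+1 at start c-r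
def pvOddLoop (cs : List Char) (c r : Nat) (best : List Nat) : List Nat :=
  if h : r ≤ c ∧ c + r < cs.length ∧ cs.getD (c - r) 'a' = cs.getD (c + r) 'a' then
    pvOddLoop cs c (r + 1)
      (if 2 * r + 1 > best.getD (c - r) 0 then best.set (c - r) (2 * r + 1) else best)
  else best
termination_by cs.length - (c + r)
decreasing_by omega

-- the even-center while loop of Source B: expand around the gap (c, c+1), recording 2r+2 at c-r
def pvEvenLoop (cs : List Char) (c r : Nat) (best : List Nat) : List Nat :=
  if h : r ≤ c ∧ c + 1 + r < cs.length ∧ cs.getD (c - r) 'a' = cs.getD (c + 1 + r) 'a' then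
    pvEvenLoop cs c (r + 1)
      (if 2 * r + 2 > best.getD (c - r) 0 then best.set (c - r) (2 * r + 2) else best)
  else best
termination_by cs.length - (c + 1 + r)
decreasing_by omega

def max_palindromes_alt (s : String) : List String :=
  let cs := s.toList
  let n := cs.length
  let best := (List.range n).foldl
    (fun b c => pvEvenLoop cs c 0 (pvOddLoop cs c 0 b)) (List.replicate n 1)
  (List.range n).foldl
    (fun ret i =>
      let pd := String.ofList ((cs.drop i).take (best.getD i 0))   -- s[i : i + best[i]]
      if ret.any (fun prev => PySem.Str.isIn pd prev) then ret else ret ++ [pd])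
    []

-- ===== PRECONDITION & SPEC =====
def Spec_max_palindromes (s : String) (out : List String) : Prop := out = max_palindromes_alt s
instance (s : String) (out : List String) : Decidable (Spec_max_palindromes s out) := by unfold Spec_max_palindromes; infer_instance

-- ===== CLAIM (what is proved, stated in full; the proofs are below) =====
def Claim_equal_max_palindromes : Prop := ∀ (s : String), Dom_max_palindromes s → Spec_max_palindromes s (max_palindromes s)

-- ===== LEMMAS AND PROOFS =====

lemma pvOfList_inj {l m : List Char} (h : String.ofList l = String.ofList m) : l = m := by
  have := congrArg String.toList h; simpa using this

lemma pvOfList_beq (l m : List Char) : (String.ofList l == String.ofList m) = (l == m) := by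
  by_cases h : l = m
  · simp [h]
  · have h2 : ¬ String.ofList l = String.ofList m := fun hc => h (pvOfList_inj hc)
    simp [h, h2]

-- s[-1::-1] is the full reverse (start -1 names the last element, the default for step -1)
lemma pvRevSlice (t : String) :
    PySem.Str.slice? t (some (-1)) none (-1) = some (String.ofList t.toList.reverse) := by
  have h : PySem.List.sliceIndices t.toList.length (some (-1)) none (-1)
      = PySem.List.sliceIndices t.toList.length none none (-1) := by
    simp [PySem.List.sliceIndices]; omega
  have h2 : PySem.Str.slice? t (some (-1)) none (-1) = PySem.Str.slice? t none none (-1) := by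
    simp only [PySem.Str.slice?, PySem.Chars.slice?_eq_listSlice?, PySem.List.slice?, h]
  rw [h2, PySem.Str.slice?_none_none_neg_one]

-- A's palindrome test, on the character list
lemma pvPalA_eq (l : List Char) :
    pvPalindromeA (String.ofList l) = (l == l.reverse) := by
  unfold pvPalindromeA
  rw [pvRevSlice]
  have hl : (String.ofList l).toList = l := by simp
  rw [hl, Option.getD_some, pvOfList_beq]

lemma pvShortPal (l : List Char) (h : l.length ≤ 1) : l.reverse = l := by
  match l, h with
  | [], _ => rfl
  | [a], _ => rfl

-- s[i:e] with natural bounds, as a String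
lemma pvSliceA (s : String) (i e : Nat) :
    PySem.Str.slice s (some (i : Int)) (some (e : Int))
      = String.ofList ((s.toList.drop i).take (e - i)) := by
  simp [PySem.Str.slice, PySem.Chars.slice_eq_listSlice, PySem.List.slice_natCast]

lemma pvSliceLen (cs : List Char) (i L : Nat) (h : i + L ≤ cs.length) :
    ((cs.drop i).take L).length = L := by
  rw [List.length_take, List.length_drop]; omega

lemma pvSliceGetD (cs : List Char) (i L k : Nat) (h : i + L ≤ cs.length) (hk : k < L) :
    ((cs.drop i).take L).getD k 'a' = cs.getD (i + k) 'a' := by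
  have h1 : k < ((cs.drop i).take L).length := by rw [pvSliceLen cs i L h]; exact hk
  have h2 : i + k < cs.length := by omega
  have h3 : k < (cs.drop i).length := by rw [List.length_drop]; omega
  rw [List.getD_eq_getElem _ 'a' h1, List.getD_eq_getElem _ 'a' h2]
  rw [List.getElem_take, List.getElem_drop]

-- a slice is a palindrome iff its characters pair up symmetrically
lemma pvPal_iff_pairs (cs : List Char) (i L : Nat) (h : i + L ≤ cs.length) :
    ((((cs.drop i).take L) == ((cs.drop i).take L).reverse) = true)
      ↔ ∀ k, k < L → cs.getD (i + k) 'a' = cs.getD (i + (L - 1 - k)) 'a' := by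
  rw [beq_iff_eq]
  have hlen : ((cs.drop i).take L).length = L := pvSliceLen cs i L h
  constructor
  · intro he k hk
    have h1 : k < ((cs.drop i).take L).length := by omega
    have h2 : k < ((cs.drop i).take L).reverse.length := by simpa using h1
    have hgk : ((cs.drop i).take L)[k]'h1 = ((cs.drop i).take L).reverse[k]'h2 := by
      congr 1
    rw [List.getElem_reverse] at hgk
    have e1 : ((cs.drop i).take L).getD k 'a' = ((cs.drop i).take L).getD (((cs.drop i).take L).length - 1 - k) 'a' := by
      rw [List.getD_eq_getElem _ 'a' h1, List.getD_eq_getElem _ 'a' (by omega)]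
      exact hgk
    rw [pvSliceGetD cs i L k h hk] at e1
    rw [hlen] at e1
    rw [pvSliceGetD cs i L (L - 1 - k) h (by omega)] at e1
    exact e1
  · intro hp
    apply List.ext_getElem (by simp)
    intro k h1 h2
    rw [List.getElem_reverse]
    have hk : k < L := by omega
    have e1 := hp k hk
    rw [← pvSliceGetD cs i L k h hk] at e1
    rw [← pvSliceGetD cs i L (L - 1 - k) h (by omega)] at e1
    rw [List.getD_eq_getElem _ 'a' h1, List.getD_eq_getElem _ 'a' (by rw [hlen]; omega)] at e1
    rw [e1]
    congr 1
    omega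

-- the two while-loop conditions of Source B, as predicates on the radius
def pvCondO (cs : List Char) (c j : Nat) : Prop :=
  j ≤ c ∧ c + j < cs.length ∧ cs.getD (c - j) 'a' = cs.getD (c + j) 'a'

def pvCondE (cs : List Char) (c j : Nat) : Prop :=
  j ≤ c ∧ c + 1 + j < cs.length ∧ cs.getD (c - j) 'a' = cs.getD (c + 1 + j) 'a'

-- matched pairs up to radius r give an odd palindrome of length 2r+1 at start c-r
lemma pvOdd_pal (cs : List Char) (c r : Nat) (hc : ∀ j, j ≤ r → pvCondO cs c j) :
    ((((cs.drop (c - r)).take (2 * r + 1)) == ((cs.drop (c - r)).take (2 * r + 1)).reverse) = true) := by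
  obtain ⟨hrc, hlen, _⟩ := hc r le_rfl
  have hb : (c - r) + (2 * r + 1) ≤ cs.length := by omega
  rw [pvPal_iff_pairs cs (c - r) (2 * r + 1) hb]
  intro k hk
  by_cases hkr : k ≤ r
  · obtain ⟨_, _, he⟩ := hc (r - k) (by omega)
    have e1 : c - (r - k) = (c - r) + k := by omega
    have e2 : c + (r - k) = (c - r) + (2 * r + 1 - 1 - k) := by omega
    rw [e1, e2] at he
    exact he
  · obtain ⟨_, _, he⟩ := hc (k - r) (by omega)
    have e1 : c - (k - r) = (c - r) + (2 * r + 1 - 1 - k) := by omega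
    have e2 : c + (k - r) = (c - r) + k := by omega
    rw [e1, e2] at he
    exact he.symm

lemma pvEven_pal (cs : List Char) (c r : Nat) (hc : ∀ j, j ≤ r → pvCondE cs c j) :
    ((((cs.drop (c - r)).take (2 * r + 2)) == ((cs.drop (c - r)).take (2 * r + 2)).reverse) = true) := by
  obtain ⟨hrc, hlen, _⟩ := hc r le_rfl
  have hb : (c - r) + (2 * r + 2) ≤ cs.length := by omega
  rw [pvPal_iff_pairs cs (c - r) (2 * r + 2) hb]
  intro k hk
  by_cases hkr : k ≤ r
  · obtain ⟨_, _, he⟩ := hc (r - k) (by omega)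
    have e1 : c - (r - k) = (c - r) + k := by omega
    have e2 : c + 1 + (r - k) = (c - r) + (2 * r + 2 - 1 - k) := by omega
    rw [e1, e2] at he
    exact he
  · obtain ⟨_, _, he⟩ := hc (k - (r + 1)) (by omega)
    have e1 : c - (k - (r + 1)) = (c - r) + (2 * r + 2 - 1 - k) := by omega
    have e2 : c + 1 + (k - (r + 1)) = (c - r) + k := by omega
    rw [e1, e2] at he
    exact he.symm

-- an odd palindrome of length 2r+1 at start i yields matched pairs at center i+r
lemma pvPal_condsO (cs : List Char) (i r : Nat) (hb : i + (2 * r + 1) ≤ cs.length)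
    (hp : ((((cs.drop i).take (2 * r + 1)) == ((cs.drop i).take (2 * r + 1)).reverse) = true)) :
    ∀ j, j ≤ r → pvCondO cs (i + r) j := by
  intro j hj
  refine ⟨by omega, by omega, ?_⟩
  have he := (pvPal_iff_pairs cs i (2 * r + 1) hb).mp hp (r - j) (by omega)
  have e1 : i + (r - j) = (i + r) - j := by omega
  have e2 : i + (2 * r + 1 - 1 - (r - j)) = (i + r) + j := by omega
  rw [e1, e2] at he
  exact he

lemma pvPal_condsE (cs : List Char) (i r : Nat) (hb : i + (2 * r + 2) ≤ cs.length)
    (hp : ((((cs.drop i).take (2 * r + 2)) == ((cs.drop i).take (2 * r + 2)).reverse) = true)) :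
    ∀ j, j ≤ r → pvCondE cs (i + r) j := by
  intro j hj
  refine ⟨by omega, by omega, ?_⟩
  have he := (pvPal_iff_pairs cs i (2 * r + 2) hb).mp hp (r - j) (by omega)
  have e1 : i + (r - j) = (i + r) - j := by omega
  have e2 : i + (2 * r + 2 - 1 - (r - j)) = (i + r) + 1 + j := by omega
  rw [e1, e2] at he
  exact he

-- proof-side two-pointer palindrome test and the "largest palindromic end" function
def pvPalLoop (cs : List Char) (l r : Nat) : Bool :=
  if l < r then
    if cs.getD l 'a' != cs.getD r 'a' then false
    else pvPalLoop cs (l + 1) (r - 1)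
  else true
termination_by r - l

def pvIsPalB (cs : List Char) (i j : Nat) : Bool := pvPalLoop cs i (j - 1)

def pvFindE (cs : List Char) (i e : Nat) : Nat :=
  if i + 1 < e ∧ ¬ pvIsPalB cs i e then pvFindE cs i (e - 1) else e
termination_by e

lemma pvConsAppendPal' (a b : Char) (ys : List Char) :
    (a :: (ys ++ [b])) = (a :: (ys ++ [b])).reverse ↔ (a = b ∧ ys = ys.reverse) := by
  have hrev : (a :: (ys ++ [b])).reverse = b :: (ys.reverse ++ [a]) := by simp
  rw [hrev]
  constructor
  · intro h
    rw [List.cons.injEq] at h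
    obtain ⟨hab, hrest⟩ := h
    subst hab
    rw [List.append_left_inj] at hrest
    exact ⟨rfl, hrest⟩
  · rintro ⟨hab, hys⟩
    subst hab
    rw [List.cons.injEq]
    exact ⟨rfl, by rw [← hys]⟩

lemma pvConsAppendPal (a b : Char) (ys : List Char) :
    ((a :: (ys ++ [b])) == (a :: (ys ++ [b])).reverse) = ((a == b) && (ys == ys.reverse)) := by
  rw [Bool.eq_iff_iff]
  simp only [beq_iff_eq, Bool.and_eq_true]
  exact pvConsAppendPal' a b ys

-- the two-pointer loop decides "s[l : r+1] is a palindrome"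
lemma pvPalLoop_eq (cs : List Char) (l r : Nat) (hr : r < cs.length) :
    pvPalLoop cs l r
      = (((cs.drop l).take (r + 1 - l)) == ((cs.drop l).take (r + 1 - l)).reverse) := by
  by_cases hlr : l < r
  · have hl : l < cs.length := lt_trans hlr hr
    rw [pvPalLoop]
    simp only [hlr, if_true]
    rw [List.getD_eq_getElem cs 'a' hl, List.getD_eq_getElem cs 'a' hr]
    have h2 : (cs.drop (l + 1))[r - (l + 1)]? = some cs[r] := by
      rw [List.getElem?_drop]
      have hx : l + 1 + (r - (l + 1)) = r := by omega
      rw [hx, List.getElem?_eq_getElem hr]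
    have hdecomp : (cs.drop l).take (r + 1 - l)
        = cs[l] :: ((cs.drop (l + 1)).take (r - (l + 1)) ++ [cs[r]]) := by
      rw [List.drop_eq_getElem_cons hl]
      have h1 : r + 1 - l = (r - (l + 1) + 1) + 1 := by omega
      rw [h1, List.take_succ_cons, List.take_add_one, h2]
      rfl
    have ih := pvPalLoop_eq cs (l + 1) (r - 1) (by omega)
    have hidx : r - 1 + 1 - (l + 1) = r - (l + 1) := by omega
    rw [hidx] at ih
    rw [hdecomp, pvConsAppendPal, ih]
    cases hab : cs[l] == cs[r] <;>
      simp only [hab, bne, Bool.not_false, Bool.not_true, if_true, if_false,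
        Bool.false_and, Bool.true_and, Bool.false_eq_true]
  · rw [pvPalLoop]
    simp only [hlr, if_false]
    have hlen : ((cs.drop l).take (r + 1 - l)).length ≤ 1 := by
      rw [List.length_take]
      omega
    rw [pvShortPal _ hlen]
    simp
  termination_by r - l

lemma pvIsPalB_eq (cs : List Char) (i e : Nat) (h1 : i + 1 ≤ e) (h2 : e ≤ cs.length) :
    pvIsPalB cs i e
      = (((cs.drop i).take (e - i)) == ((cs.drop i).take (e - i)).reverse) := by
  unfold pvIsPalB
  have h3 : e - 1 < cs.length := by omega
  rw [pvPalLoop_eq cs i (e - 1) h3]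
  have h4 : e - 1 + 1 - i = e - i := by omega
  rw [h4]

lemma pvFindE_bounds (cs : List Char) (i e : Nat) (he : i + 1 ≤ e) :
    i + 1 ≤ pvFindE cs i e ∧ pvFindE cs i e ≤ e := by
  rw [pvFindE]
  split
  · rename_i h
    have := pvFindE_bounds cs i (e - 1) (by omega)
    omega
  · omega
  termination_by e

-- the slice up to pvFindE is a palindrome
lemma pvFindE_pal (cs : List Char) (i e : Nat) (h1 : i + 1 ≤ e) (h2 : e ≤ cs.length)
    (hi : i < cs.length) :
    ((((cs.drop i).take (pvFindE cs i e - i)) == ((cs.drop i).take (pvFindE cs i e - i)).reverse) = true) := by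
  rw [pvFindE]
  split
  · rename_i h
    exact pvFindE_pal cs i (e - 1) (by omega) (by omega) hi
  · rename_i h
    by_cases hp : pvIsPalB cs i e = true
    · rw [pvIsPalB_eq cs i e h1 h2] at hp
      exact hp
    · have he : e = i + 1 := by
        rcases Nat.lt_or_ge (i + 1) e with hlt | hge
        · exact absurd ⟨hlt, by simpa using hp⟩ h
        · omega
      subst he
      have hlen : ((cs.drop i).take (i + 1 - i)).length ≤ 1 := by
        rw [List.length_take]; omega
      rw [pvShortPal _ hlen]
      simp
  termination_by e

-- no palindromic end strictly above pvFindE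
lemma pvFindE_max (cs : List Char) (i e : Nat) (h1 : i + 1 ≤ e) (h2 : e ≤ cs.length) :
    ∀ e', pvFindE cs i e < e' → e' ≤ e →
      ((((cs.drop i).take (e' - i)) == ((cs.drop i).take (e' - i)).reverse) = false) := by
  rw [pvFindE]
  split
  · rename_i h
    intro e' hgt hle
    by_cases hee : e' = e
    · subst hee
      have := h.2
      rw [pvIsPalB_eq cs i e' h1 h2] at this
      simpa using this
    · exact pvFindE_max cs i (e - 1) (by omega) (by omega) e' hgt (by omega)
  · intro e' hgt hle
    omega
  termination_by e

-- "v is the length of a palindromic substring starting at l"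
def pvGood (cs : List Char) (l v : Nat) : Prop :=
  1 ≤ v ∧ l + v ≤ cs.length ∧
    ((((cs.drop l).take v) == ((cs.drop l).take v).reverse) = true)

lemma pvGood_le (cs : List Char) (l v : Nat) (hg : pvGood cs l v) :
    v ≤ pvFindE cs l cs.length - l := by
  obtain ⟨h1, h2, h3⟩ := hg
  have hl : l + 1 ≤ cs.length := by omega
  have hb := pvFindE_bounds cs l cs.length hl
  by_contra hcon
  have hgt : pvFindE cs l cs.length < l + v := by omega
  have := pvFindE_max cs l cs.length hl le_rfl (l + v) hgt h2
  rw [show l + v - l = v by omega] at this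
  rw [h3] at this
  simp at this

def pvInv (cs : List Char) (best : List Nat) : Prop :=
  best.length = cs.length ∧ ∀ l, l < cs.length → pvGood cs l (best.getD l 0)

lemma pvGetD_set (xs : List Nat) (l v l' : Nat) :
    (xs.set l v).getD l' 0 = if l' = l ∧ l < xs.length then v else xs.getD l' 0 := by
  by_cases h : l' = l ∧ l < xs.length
  · obtain ⟨he, hl⟩ := h
    subst he
    rw [if_pos ⟨rfl, hl⟩]
    have : l' < (xs.set l' v).length := by simpa using hl
    rw [List.getD_eq_getElem _ 0 this, List.getElem_set_self]
  · rw [if_neg h]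
    unfold List.getD
    rw [List.getElem?_set]
    by_cases he : l = l'
    · subst he
      have hl : ¬ l < xs.length := fun hc => h ⟨rfl, hc⟩
      rw [if_pos rfl, if_neg hl, List.getElem?_eq_none (Nat.le_of_not_lt hl)]
    · simp [he]

lemma pvOddLoop_len (cs : List Char) (c r : Nat) (best : List Nat) :
    (pvOddLoop cs c r best).length = best.length := by
  rw [pvOddLoop]
  split
  · rename_i h
    rw [pvOddLoop_len cs c (r + 1)]
    split <;> simp
  · rfl
  termination_by cs.length - (c + r)
  decreasing_by omega

lemma pvEvenLoop_len (cs : List Char) (c r : Nat) (best : List Nat) :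
    (pvEvenLoop cs c r best).length = best.length := by
  rw [pvEvenLoop]
  split
  · rename_i h
    rw [pvEvenLoop_len cs c (r + 1)]
    split <;> simp
  · rfl
  termination_by cs.length - (c + 1 + r)
  decreasing_by omega

lemma pvOddLoop_mono (cs : List Char) (c r : Nat) (best : List Nat) (l : Nat) :
    best.getD l 0 ≤ (pvOddLoop cs c r best).getD l 0 := by
  rw [pvOddLoop]
  split
  · rename_i h
    refine le_trans ?_ (pvOddLoop_mono cs c (r + 1) _ l)
    split
    · rename_i hgt
      rw [pvGetD_set]
      split
      · rename_i hc
        rw [hc.1]; omega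
      · exact le_rfl
    · exact le_rfl
  · exact le_rfl
  termination_by cs.length - (c + r)
  decreasing_by omega

lemma pvEvenLoop_mono (cs : List Char) (c r : Nat) (best : List Nat) (l : Nat) :
    best.getD l 0 ≤ (pvEvenLoop cs c r best).getD l 0 := by
  rw [pvEvenLoop]
  split
  · rename_i h
    refine le_trans ?_ (pvEvenLoop_mono cs c (r + 1) _ l)
    split
    · rename_i hgt
      rw [pvGetD_set]
      split
      · rename_i hc
        rw [hc.1]; omega
      · exact le_rfl
    · exact le_rfl
  · exact le_rfl
  termination_by cs.length - (c + 1 + r)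
  decreasing_by omega

lemma pvInv_set (cs : List Char) (best : List Nat) (l v : Nat)
    (hinv : pvInv cs best) (hg : pvGood cs l v) : pvInv cs (best.set l v) := by
  obtain ⟨hlen, hgood⟩ := hinv
  refine ⟨by simpa using hlen, ?_⟩
  intro l' hl'
  rw [pvGetD_set]
  split
  · rename_i hc
    rw [hc.1]
    exact hg
  · exact hgood l' hl'

lemma pvOddLoop_inv (cs : List Char) (c r : Nat) (best : List Nat)
    (hprev : ∀ j, j < r → pvCondO cs c j) (hinv : pvInv cs best) :
    pvInv cs (pvOddLoop cs c r best) := by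
  rw [pvOddLoop]
  split
  · rename_i h
    have hcond : pvCondO cs c r := ⟨h.1, h.2.1, h.2.2⟩
    have hprev' : ∀ j, j < r + 1 → pvCondO cs c j := by
      intro j hj
      rcases Nat.lt_or_ge j r with hlt | hge
      · exact hprev j hlt
      · have : j = r := by omega
        subst this; exact hcond
    have hg : pvGood cs (c - r) (2 * r + 1) := by
      refine ⟨by omega, by omega, ?_⟩
      exact pvOdd_pal cs c r (fun j hj => hprev' j (by omega))
    refine pvOddLoop_inv cs c (r + 1) _ hprev' ?_
    split
    · exact pvInv_set cs best (c - r) (2 * r + 1) hinv hg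
    · exact hinv
  · exact hinv
  termination_by cs.length - (c + r)
  decreasing_by omega

lemma pvEvenLoop_inv (cs : List Char) (c r : Nat) (best : List Nat)
    (hprev : ∀ j, j < r → pvCondE cs c j) (hinv : pvInv cs best) :
    pvInv cs (pvEvenLoop cs c r best) := by
  rw [pvEvenLoop]
  split
  · rename_i h
    have hcond : pvCondE cs c r := ⟨h.1, h.2.1, h.2.2⟩
    have hprev' : ∀ j, j < r + 1 → pvCondE cs c j := by
      intro j hj
      rcases Nat.lt_or_ge j r with hlt | hge
      · exact hprev j hlt
      · have : j = r := by omega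
        subst this; exact hcond
    have hg : pvGood cs (c - r) (2 * r + 2) := by
      refine ⟨by omega, by omega, ?_⟩
      exact pvEven_pal cs c r (fun j hj => hprev' j (by omega))
    refine pvEvenLoop_inv cs c (r + 1) _ hprev' ?_
    split
    · exact pvInv_set cs best (c - r) (2 * r + 2) hinv hg
    · exact hinv
  · exact hinv
  termination_by cs.length - (c + 1 + r)
  decreasing_by omega

-- the expansion loop reaches every radius whose pairs all match
lemma pvOddLoop_reach (cs : List Char) (c r r' : Nat) (best : List Nat)
    (hrr : r ≤ r') (hlen : best.length = cs.length)
    (hc : ∀ j, j ≤ r' → pvCondO cs c j) :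
    2 * r' + 1 ≤ (pvOddLoop cs c r best).getD (c - r') 0 := by
  have hcr : pvCondO cs c r := hc r hrr
  rw [pvOddLoop, dif_pos ⟨hcr.1, hcr.2.1, hcr.2.2⟩]
  rcases Nat.lt_or_ge r r' with hlt | hge
  · refine pvOddLoop_reach cs c (r + 1) r' _ (by omega) ?_ hc
    split <;> simp [hlen]
  · have he : r = r' := by omega
    subst he
    refine le_trans ?_ (pvOddLoop_mono cs c (r + 1) _ (c - r))
    have hcr2 := hcr.2.1
    have hcl : c - r < best.length := by
      rw [hlen]; omega
    split
    · rename_i hgt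
      rw [pvGetD_set, if_pos ⟨rfl, hcl⟩]
    · rename_i hgt
      omega
  termination_by r' - r

lemma pvEvenLoop_reach (cs : List Char) (c r r' : Nat) (best : List Nat)
    (hrr : r ≤ r') (hlen : best.length = cs.length)
    (hc : ∀ j, j ≤ r' → pvCondE cs c j) :
    2 * r' + 2 ≤ (pvEvenLoop cs c r best).getD (c - r') 0 := by
  have hcr : pvCondE cs c r := hc r hrr
  rw [pvEvenLoop, dif_pos ⟨hcr.1, hcr.2.1, hcr.2.2⟩]
  rcases Nat.lt_or_ge r r' with hlt | hge
  · refine pvEvenLoop_reach cs c (r + 1) r' _ (by omega) ?_ hc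
    split <;> simp [hlen]
  · have he : r = r' := by omega
    subst he
    refine le_trans ?_ (pvEvenLoop_mono cs c (r + 1) _ (c - r))
    have hcr2 := hcr.2.1
    have hcl : c - r < best.length := by
      rw [hlen]; omega
    split
    · rename_i hgt
      rw [pvGetD_set, if_pos ⟨rfl, hcl⟩]
    · rename_i hgt
      omega
  termination_by r' - r

-- the center step of B's first pass
def pvStep (cs : List Char) (b : List Nat) (c : Nat) : List Nat :=
  pvEvenLoop cs c 0 (pvOddLoop cs c 0 b)

lemma pvStep_len (cs : List Char) (b : List Nat) (c : Nat) :
    (pvStep cs b c).length = b.length := by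
  unfold pvStep
  rw [pvEvenLoop_len, pvOddLoop_len]

lemma pvStep_mono (cs : List Char) (b : List Nat) (c l : Nat) :
    b.getD l 0 ≤ (pvStep cs b c).getD l 0 := by
  unfold pvStep
  exact le_trans (pvOddLoop_mono cs c 0 b l) (pvEvenLoop_mono cs c 0 _ l)

lemma pvFold_len (cs : List Char) (L : List Nat) (b : List Nat) :
    (L.foldl (pvStep cs) b).length = b.length := by
  induction L generalizing b with
  | nil => rfl
  | cons c rest ih => rw [List.foldl_cons, ih, pvStep_len]

lemma pvFold_mono (cs : List Char) (L : List Nat) (b : List Nat) (l : Nat) :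
    b.getD l 0 ≤ (L.foldl (pvStep cs) b).getD l 0 := by
  induction L generalizing b with
  | nil => exact le_rfl
  | cons c rest ih =>
    rw [List.foldl_cons]
    exact le_trans (pvStep_mono cs b c l) (ih _)

lemma pvFold_inv (cs : List Char) (L : List Nat) (b : List Nat) (hinv : pvInv cs b) :
    pvInv cs (L.foldl (pvStep cs) b) := by
  induction L generalizing b with
  | nil => exact hinv
  | cons c rest ih =>
    rw [List.foldl_cons]
    refine ih _ ?_
    unfold pvStep
    exact pvEvenLoop_inv cs c 0 _ (by omega) (pvOddLoop_inv cs c 0 b (by omega) hinv)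

lemma pvInv_init (cs : List Char) : pvInv cs (List.replicate cs.length 1) := by
  refine ⟨by simp, ?_⟩
  intro l hl
  have hg : (List.replicate cs.length 1).getD l 0 = 1 := by
    rw [List.getD_eq_getElem _ 0 (by simpa using hl), List.getElem_replicate]
  rw [hg]
  refine ⟨le_rfl, by omega, ?_⟩
  have hlen : ((cs.drop l).take 1).length ≤ 1 := by
    rw [List.length_take]; omega
  rw [pvShortPal _ hlen]
  simp

lemma pvRange_split (c n : Nat) (h : c < n) :
    List.range n = (List.range c ++ [c]) ++ (List.range (n - (c + 1))).map (fun x => (c + 1) + x) := by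
  have h1 := @List.range_add (c + 1) (n - (c + 1))
  rw [show (c + 1) + (n - (c + 1)) = n by omega] at h1
  rw [h1, List.range_succ]

-- B's best array holds exactly the longest palindromic length per start index
lemma pvBest_eq (cs : List Char) (i : Nat) (hi : i < cs.length) :
    ((List.range cs.length).foldl (pvStep cs) (List.replicate cs.length 1)).getD i 0
      = pvFindE cs i cs.length - i := by
  set n := cs.length with hn
  set bf := (List.range n).foldl (pvStep cs) (List.replicate n 1) with hbf
  have hinv : pvInv cs bf := pvFold_inv cs _ _ (pvInv_init cs)
  have hub : bf.getD i 0 ≤ pvFindE cs i n - i :=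
    pvGood_le cs i _ (hinv.2 i hi)
  -- lower bound
  have hFb := pvFindE_bounds cs i n (by omega)
  set L := pvFindE cs i n - i with hL
  have hL1 : 1 ≤ L := by omega
  have hLn : i + L ≤ n := by omega
  have hpal := pvFindE_pal cs i n (by omega) le_rfl hi
  rw [← hL] at hpal
  have hlb : L ≤ bf.getD i 0 := by
    rcases Nat.even_or_odd L with hev | hod
    · -- L = 2r+2
      obtain ⟨r', hr'⟩ := hev
      have hr : L = 2 * (r' - 1) + 2 := by omega
      set r := r' - 1 with hrdef
      have hc : i + r < n := by omega
      have hconds : ∀ j, j ≤ r → pvCondE cs (i + r) j := by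
        refine pvPal_condsE cs i r (by omega) ?_
        rw [← hr]; exact hpal
      rw [pvRange_split (i + r) n hc, List.foldl_append, List.foldl_append,
        List.foldl_cons, List.foldl_nil] at hbf
      set b1 := (List.range (i + r)).foldl (pvStep cs) (List.replicate n 1) with hb1
      have hlen1 : b1.length = n := by rw [hb1, pvFold_len]; simp
      have hreach : 2 * r + 2 ≤ (pvStep cs b1 (i + r)).getD ((i + r) - r) 0 := by
        unfold pvStep
        refine pvEvenLoop_reach cs (i + r) 0 r _ (by omega) ?_ hconds
        rw [pvOddLoop_len, hlen1]
      rw [show (i + r) - r = i by omega] at hreach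
      calc L = 2 * r + 2 := hr
        _ ≤ (pvStep cs b1 (i + r)).getD i 0 := hreach
        _ ≤ bf.getD i 0 := by rw [hbf]; exact pvFold_mono cs _ _ i
    · -- L = 2r+1
      obtain ⟨r, hr⟩ := hod
      have hc : i + r < n := by omega
      have hconds : ∀ j, j ≤ r → pvCondO cs (i + r) j := by
        refine pvPal_condsO cs i r (by omega) ?_
        rw [← hr]; exact hpal
      rw [pvRange_split (i + r) n hc, List.foldl_append, List.foldl_append,
        List.foldl_cons, List.foldl_nil] at hbf
      set b1 := (List.range (i + r)).foldl (pvStep cs) (List.replicate n 1) with hb1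
      have hlen1 : b1.length = n := by rw [hb1, pvFold_len]; simp
      have hreach : 2 * r + 1 ≤ (pvOddLoop cs (i + r) 0 b1).getD ((i + r) - r) 0 :=
        pvOddLoop_reach cs (i + r) 0 r b1 (by omega) (by omega) hconds
      rw [show (i + r) - r = i by omega] at hreach
      calc L = 2 * r + 1 := hr
        _ ≤ (pvOddLoop cs (i + r) 0 b1).getD i 0 := hreach
        _ ≤ (pvStep cs b1 (i + r)).getD i 0 := pvEvenLoop_mono cs (i + r) 0 _ i
        _ ≤ bf.getD i 0 := by rw [hbf]; exact pvFold_mono cs _ _ i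
  omega

-- A's upward keep-last scan over e ∈ [i+1, m] equals the downward first-hit pvFindE
lemma pvInner_eq (s : String) (i : Nat) (hi : i < s.toList.length) (pd0 : String) :
    ∀ m : Nat, i + 1 ≤ m → m ≤ s.toList.length →
      (PySem.List.pyRange ((i : Int) + 1) ((m : Int) + 1) 1).foldl
        (fun pd eidx =>
          if pvPalindromeA (PySem.Str.slice s (some (i : Int)) (some eidx)) then
            PySem.Str.slice s (some (i : Int)) (some eidx)
          else pd) pd0
      = String.ofList ((s.toList.drop i).take (pvFindE s.toList i m - i)) := by
  intro m hm
  induction m, hm using Nat.le_induction with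
  | base =>
    intro hn
    rw [show ((i + 1 : Nat) : Int) + 1 = ((i : Int) + 1) + 1 by push_cast; ring,
      PySem.List.pyRange_one_succ_right (le_refl ((i : Int) + 1))]
    have hemp : PySem.List.pyRange ((i : Int) + 1) ((i : Int) + 1) 1 = [] := by simp [pysem]
    rw [hemp]
    simp only [List.nil_append, List.foldl_cons, List.foldl_nil]
    have hcast : ((i : Int) + 1) = ((i + 1 : Nat) : Int) := by push_cast; ring
    rw [hcast, pvSliceA]
    have hsub : (s.toList.drop i).take (i + 1 - i) = [s.toList[i]] := by
      rw [List.drop_eq_getElem_cons hi, show i + 1 - i = 1 by omega]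
      rfl
    have hC : pvPalindromeA (String.ofList ((s.toList.drop i).take (i + 1 - i))) = true := by
      rw [pvPalA_eq, hsub]
      simp
    rw [hC]
    simp only [if_true]
    have hfe : pvFindE s.toList i (i + 1) = i + 1 := by
      rw [pvFindE]
      simp
    rw [hfe]
  | succ m hm ih =>
    intro hn
    have hmn : m ≤ s.toList.length := by omega
    have hrw : ((m + 1 : Nat) : Int) + 1 = ((m : Int) + 1) + 1 := by push_cast; ring
    rw [hrw, PySem.List.pyRange_one_succ_right (by omega : (i : Int) + 1 ≤ (m : Int) + 1)]
    rw [List.foldl_append]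
    rw [ih hmn]
    simp only [List.foldl_cons, List.foldl_nil]
    have hcast : ((m : Int) + 1) = ((m + 1 : Nat) : Int) := by push_cast; ring
    rw [hcast, pvSliceA, pvPalA_eq]
    have hpal : pvIsPalB s.toList i (m + 1)
        = (((s.toList.drop i).take (m + 1 - i)) == ((s.toList.drop i).take (m + 1 - i)).reverse) :=
      pvIsPalB_eq s.toList i (m + 1) (by omega) hn
    conv_rhs => rw [pvFindE]
    cases hC : ((s.toList.drop i).take (m + 1 - i)) == ((s.toList.drop i).take (m + 1 - i)).reverse with
    | true =>
      rw [hC] at hpal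
      simp only [if_true]
      have : ¬ (i + 1 < m + 1 ∧ ¬ pvIsPalB s.toList i (m + 1) = true) := by
        simp [hpal]
      rw [if_neg this]
    | false =>
      rw [hC] at hpal
      simp only [Bool.false_eq_true, if_false]
      have : (i + 1 < m + 1 ∧ ¬ pvIsPalB s.toList i (m + 1) = true) := by
        constructor
        · omega
        · simp [hpal]
      rw [if_pos this]
      simp only [Nat.add_sub_cancel]

lemma pvDedupA_eq (ret : List String) (pd : String) :
    pvDedupA ret pd = if ret.any (fun prev => pvSubstringA prev pd) then none else some pd := by
  induction ret with
  | nil => rfl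
  | cons prev rest ih =>
    rw [pvDedupA, List.any_cons]
    by_cases h : pvSubstringA prev pd = true
    · simp [h]
    · simp only [Bool.not_eq_true] at h
      simp [h, ih]

lemma pvNonempty_beq_empty (l : List Char) (h : l ≠ []) : (String.ofList l == "") = false := by
  have h2 : ("" : String) = String.ofList [] := rfl
  rw [h2, pvOfList_beq]
  simpa using h

-- ===== VERDICT (by name: the statement is the Claim_ definition above) =====
theorem max_palindromes_spec : Claim_equal_max_palindromes := by
  intro s _
  unfold Spec_max_palindromes max_palindromes max_palindromes_alt
  simp only [PySem.Str.len_eq, PySem.List.pyRange_zero_natCast, List.foldl_map]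
  have hstep : ∀ (b : List Nat) (c : Nat),
      pvEvenLoop s.toList c 0 (pvOddLoop s.toList c 0 b) = pvStep s.toList b c := fun _ _ => rfl
  simp only [hstep]
  apply PySem.List.foldl_congr_mem
  intro ret i hmem
  have hi : i < s.toList.length := List.mem_range.mp hmem
  rw [pvInner_eq s i hi _ s.toList.length (by omega) (le_refl _)]
  rw [pvDedupA_eq]
  simp only [pvSubstringA]
  rw [pvBest_eq s.toList i hi]
  set pd := String.ofList ((s.toList.drop i).take (pvFindE s.toList i s.toList.length - i)) with hpd
  rcases Bool.eq_false_or_eq_true (ret.any fun prev => PySem.Str.isIn pd prev) with hany | hany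
  · simp only [hany, if_true]
  · simp only [hany, Bool.false_eq_true, if_false]
    have hE := pvFindE_bounds s.toList i s.toList.length (by omega)
    have hne : (s.toList.drop i).take (pvFindE s.toList i s.toList.length - i) ≠ [] := by
      apply List.ne_nil_of_length_pos
      rw [List.length_take, List.length_drop]
      omega
    rw [hpd, pvNonempty_beq_empty _ hne]
    simp
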